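-- pv_equiv track=rewrite | github.com/papermerge/mglib | mglib/pdftk.py | cat_ranges_for_delete
-- ===== SOURCE A (Python) =====
-- def cat_ranges_for_delete(page_count, page_numbers):
--     """
--     Returns a list of integers. Each number in the list
--     is the number of page which will 'stay' in document.
--     In other words, it returns a list with not deleted pages.
--
--     Examples:
--
--
--     If document has 22 pages (page_count=22) and page number 21 is to be
--     deleted (i.e page_numbers = [21]) will return
--
--         [1, 2, 3, 4, ..., 19, 20, 22]
--
--     If page number 1 is to be deleted:
--
--         [2, 3, 4, ..., 22] list will be returned.
--
--     If page number is 22 is to be deleted: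
--
--         [1, 2, 3,..., 21] will be returned.
--
--     With  page_numbers=[1, 7, 10] and page_count=22 result
--     will be:
--
--         (2, 3, 4, 5, 6, 8, 9, 11, 12 , 13, ..., 22)
--
--
--     page_numbers is a list of page numbers (starting with 1).
--     """
--     results = []
--
--     for check in page_numbers:
--         if not isinstance(check, int):
--             err_msg = "page_numbers must be a list of ints"
--             raise ValueError(err_msg)
--
--     for number in range(1, page_count + 1):
--         if number not in page_numbers:
--             results.append(number)
--
--     return results
-- ===== SOURCE B (Python) =====
-- def cat_ranges_for_delete(page_count, page_numbers):
--     for check in page_numbers: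
--         if not isinstance(check, int):
--             err_msg = "page_numbers must be a list of ints"
--             raise ValueError(err_msg)
--     dels = sorted({d for d in page_numbers if 1 <= d <= page_count})
--     results = []
--     start = 1
--     for d in dels:
--         results.extend(range(start, d))
--         start = d + 1
--     results.extend(range(start, page_count + 1))
--     return results
-- ===== Notes on version B (the rewrite author's own statement) =====
-- stated objective: faster
-- what changed: Instead of scanning every page 1..page_count and testing list membership, B sorts the deduped in-range deletion points once and emits the gap-runs between consecutive deletions with a moving cursor.
import Mathlib
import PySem

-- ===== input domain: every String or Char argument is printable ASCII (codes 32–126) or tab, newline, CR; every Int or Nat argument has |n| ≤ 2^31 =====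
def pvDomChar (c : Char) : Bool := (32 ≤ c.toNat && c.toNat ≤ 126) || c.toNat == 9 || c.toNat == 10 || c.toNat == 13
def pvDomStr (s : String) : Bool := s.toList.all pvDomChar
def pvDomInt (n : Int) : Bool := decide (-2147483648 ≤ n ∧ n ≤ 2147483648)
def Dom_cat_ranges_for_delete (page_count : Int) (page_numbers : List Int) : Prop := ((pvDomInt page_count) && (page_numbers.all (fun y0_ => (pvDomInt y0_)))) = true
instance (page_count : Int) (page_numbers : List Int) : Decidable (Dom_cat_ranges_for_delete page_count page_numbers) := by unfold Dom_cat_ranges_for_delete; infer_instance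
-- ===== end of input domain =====

-- B replaces the per-page membership scan by one sorted pass over the deduped
-- in-range deletion points, emitting the gap-runs between them (faster).
-- The isinstance validation loop of both Pythons never raises on List Int
-- (every element is an int), so it has no Lean counterpart.

-- ===== PORT A =====
def cat_ranges_for_delete (page_count : Int) (page_numbers : List Int) : List Int :=
  (PySem.List.pyRange 1 (page_count + 1) 1).foldl
    (fun results number => if number ∉ page_numbers then results ++ [number] else results) []

-- ===== PORT B =====
def cat_ranges_for_delete_alt (page_count : Int) (page_numbers : List Int) : List Int :=
  let dels : List Int :=
    PySem.List.sorted
      (PySem.Set.ofList (page_numbers.filter (fun d => 1 ≤ d ∧ d ≤ page_count)))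
      (fun x => x) false
  let st : List Int × Int :=
    dels.foldl (fun acc d => (acc.1 ++ PySem.List.pyRange acc.2 d 1, d + 1)) ([], 1)
  st.1 ++ PySem.List.pyRange st.2 (page_count + 1) 1

-- ===== PRECONDITION & SPEC =====
def Spec_cat_ranges_for_delete (page_count : Int) (page_numbers : List Int) (out : List Int) : Prop := out = cat_ranges_for_delete_alt page_count page_numbers
instance (page_count : Int) (page_numbers : List Int) (out : List Int) : Decidable (Spec_cat_ranges_for_delete page_count page_numbers out) := by unfold Spec_cat_ranges_for_delete; infer_instance

-- ===== CLAIM (what is proved, stated in full; the proofs are below) =====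
def Claim_equal_cat_ranges_for_delete : Prop := ∀ (page_count : Int) (page_numbers : List Int), Dom_cat_ranges_for_delete page_count page_numbers → Spec_cat_ranges_for_delete page_count page_numbers (cat_ranges_for_delete page_count page_numbers)

-- ===== LEMMAS AND PROOFS =====

-- The gap-emitting fold over a strictly increasing, in-range list of deletion
-- points produces exactly the range filtered by non-membership.
theorem pvGaps_eq_filter (pc : Int) (ds : List Int) (acc : List Int) (start : Int)
    (hs : ds.Pairwise (· < ·))
    (hb : ∀ d ∈ ds, start ≤ d ∧ d < pc + 1) :
    (let st := ds.foldl (fun acc d => (acc.1 ++ PySem.List.pyRange acc.2 d 1, d + 1)) (acc, start)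
     st.1 ++ PySem.List.pyRange st.2 (pc + 1) 1)
    = acc ++ (PySem.List.pyRange start (pc + 1) 1).filter (fun n => n ∉ ds) := by
  induction ds generalizing acc start with
  | nil => simp
  | cons d rest ih =>
    simp only [List.foldl_cons, List.pairwise_cons] at *
    obtain ⟨hd1, hd2⟩ := hb d (by simp)
    have hrest : ∀ e ∈ rest, d + 1 ≤ e ∧ e < pc + 1 := by
      intro e he
      exact ⟨by have := hs.1 e he; omega, (hb e (by simp [he])).2⟩
    rw [ih (acc ++ PySem.List.pyRange start d 1) (d + 1) hs.2 hrest]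
    rw [PySem.List.pyRange_one_append start d (pc + 1) hd1 (by omega)]
    rw [PySem.List.pyRange_one_cons (a := d) (b := pc + 1) (by omega)]
    simp only [List.filter_append, List.filter_cons, List.append_assoc]
    have h1 : (PySem.List.pyRange start d 1).filter (fun n => n ∉ d :: rest)
        = PySem.List.pyRange start d 1 := by
      apply List.filter_eq_self.mpr
      intro n hn
      rw [PySem.List.mem_pyRange_one] at hn
      simp only [List.mem_cons, decide_eq_true_eq]
      push Not
      refine ⟨by omega, fun hmem => ?_⟩
      have := (hrest n hmem).1; omega
    have h2 : (PySem.List.pyRange (d + 1) (pc + 1) 1).filter (fun n => n ∉ d :: rest)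
        = (PySem.List.pyRange (d + 1) (pc + 1) 1).filter (fun n => n ∉ rest) := by
      apply List.filter_congr
      intro n hn
      rw [PySem.List.mem_pyRange_one] at hn
      simp only [List.mem_cons, decide_eq_decide]
      constructor
      · intro h hmem; exact h (Or.inr hmem)
      · intro h hmem
        rcases hmem with h' | h'
        · omega
        · exact h h'
    rw [h1, h2]
    simp

-- ===== VERDICT (by name: the statement is the Claim_ definition above) =====
theorem cat_ranges_for_delete_spec : Claim_equal_cat_ranges_for_delete := by
  intro pc pns _
  unfold Spec_cat_ranges_for_delete cat_ranges_for_delete cat_ranges_for_delete_alt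
  set dels : List Int :=
    PySem.List.sorted
      (PySem.Set.ofList (pns.filter (fun d => 1 ≤ d ∧ d ≤ pc)))
      (fun x => x) false with hdels
  have hpair : dels.Pairwise (· < ·) := by
    rw [hdels]; exact PySem.List.sorted_ofList_pairwise_lt _
  have hmem : ∀ d, d ∈ dels ↔ (1 ≤ d ∧ d ≤ pc ∧ d ∈ pns) := by
    intro d
    rw [hdels, PySem.List.mem_sorted, PySem.Set.mem_ofList, List.mem_filter]
    simp; tauto
  have hb : ∀ d ∈ dels, 1 ≤ d ∧ d < pc + 1 := by
    intro d hd
    have := (hmem d).1 hd; omega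
  rw [pvGaps_eq_filter pc dels [] 1 hpair hb]
  rw [PySem.List.foldl_append_ite_eq_filter]
  simp only [List.nil_append]
  apply List.filter_congr
  intro n hn
  rw [PySem.List.mem_pyRange_one] at hn
  simp only [decide_eq_decide, hmem n]
  constructor
  · intro h h'; exact h h'.2.2
  · intro h h'; exact h ⟨by omega, by omega, h'⟩
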